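-- pv_equiv track=rewrite | github.com/billingtonjack23/TeamWin_VideoGameDatabase | csci320teamwin/database-application/for_you.py | rec_esrb
-- ===== SOURCE A (Python) =====
-- def rec_esrb(ratings):
-- 	rec_esrbs = set()
--
-- 	for esrb in ratings:
-- 		if esrb == "M":
-- 			rec_esrbs.add("E")
-- 			rec_esrbs.add("E10+")
-- 			rec_esrbs.add("T")
-- 			rec_esrbs.add("M")
-- 			rec_esrbs.add("RP")
--
-- 		elif esrb == "T":
-- 			rec_esrbs.add("E")
-- 			rec_esrbs.add("E10+")
-- 			rec_esrbs.add("T")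
--
-- 		elif esrb == "E10+":
-- 			rec_esrbs.add("E")
-- 			rec_esrbs.add("E10+")
--
-- 		elif esrb == "E":
-- 			rec_esrbs.add("E")
--
-- 	return rec_esrbs
-- ===== SOURCE B (Python) =====
-- _LEVEL = {"E": 1, "E10+": 2, "T": 3, "M": 4}
-- _CUMULATIVE = [set(), {"E"}, {"E", "E10+"}, {"E", "E10+", "T"}, {"E", "E10+", "T", "M", "RP"}]
--
-- def rec_esrb(ratings):
--     top = 0
--     for esrb in ratings:
--         level = _LEVEL.get(esrb, 0)
--         if level > top:
--             top = level
--     return set(_CUMULATIVE[top])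
-- ===== Notes on version B (the rewrite author's own statement) =====
-- stated objective: simpler
-- what changed: Instead of unioning per-rating literal sets in a four-branch if/elif chain, B makes one pass tracking only the maximum rating priority and returns the corresponding cumulative set by a single closed-form table lookup.
import Mathlib
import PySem

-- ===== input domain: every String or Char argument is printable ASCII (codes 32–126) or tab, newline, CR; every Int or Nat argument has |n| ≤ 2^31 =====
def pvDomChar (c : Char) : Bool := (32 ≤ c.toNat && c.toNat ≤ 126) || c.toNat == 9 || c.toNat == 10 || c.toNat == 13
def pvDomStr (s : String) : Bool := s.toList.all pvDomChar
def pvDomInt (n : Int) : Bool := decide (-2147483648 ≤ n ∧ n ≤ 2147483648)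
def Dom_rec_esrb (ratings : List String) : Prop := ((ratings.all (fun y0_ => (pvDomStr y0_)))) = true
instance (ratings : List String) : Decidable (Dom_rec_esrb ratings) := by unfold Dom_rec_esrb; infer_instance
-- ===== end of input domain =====

-- B replaces A's four-branch if/elif set-union loop by one pass tracking the maximum rating
-- priority and a closed-form table lookup (objective: simpler); same O(n) cost.

-- ===== PORT A =====
-- one iteration of A's loop body (the if/elif chain of set.add calls)
def stepA (s : PySem.Set String) (esrb : String) : PySem.Set String :=
  if esrb = "M" then
    PySem.Set.add (PySem.Set.add (PySem.Set.add (PySem.Set.add (PySem.Set.add s "E") "E10+") "T") "M") "RP"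
  else if esrb = "T" then
    PySem.Set.add (PySem.Set.add (PySem.Set.add s "E") "E10+") "T"
  else if esrb = "E10+" then
    PySem.Set.add (PySem.Set.add s "E") "E10+"
  else if esrb = "E" then
    PySem.Set.add s "E"
  else s

def rec_esrb (ratings : List String) : List String :=
  ratings.foldl stepA PySem.Set.empty

-- ===== PORT B =====
-- the module-level _LEVEL dict and _CUMULATIVE table of Source B
def levelDict : PySem.Dict String Nat := PySem.Dict.ofList [("E", 1), ("E10+", 2), ("T", 3), ("M", 4)]

def cumulative : List (List String) :=
  [[], ["E"], ["E", "E10+"], ["E", "E10+", "T"], ["E", "E10+", "T", "M", "RP"]]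

def rec_esrb_alt (ratings : List String) : List String :=
  let top := ratings.foldl
    (fun top esrb =>
      let level := PySem.Dict.getD levelDict esrb 0
      if level > top then level else top) 0
  PySem.Set.ofList (cumulative.getD top [])

-- ===== PRECONDITION & SPEC =====
def Spec_rec_esrb (ratings : List String) (out : List String) : Prop := out = rec_esrb_alt ratings
instance (ratings : List String) (out : List String) : Decidable (Spec_rec_esrb ratings out) := by unfold Spec_rec_esrb; infer_instance

-- ===== CLAIM (what is proved, stated in full; the proofs are below) =====
def Claim_equal_rec_esrb : Prop := ∀ (ratings : List String), Dom_rec_esrb ratings → Spec_rec_esrb ratings (rec_esrb ratings)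

-- ===== LEMMAS AND PROOFS =====


theorem levelDict_mk : levelDict = PySem.Dict.mk [("E", 1), ("E10+", 2), ("T", 3), ("M", 4)] := by
  decide

theorem getD_levelDict_other (r : String) (hM : ¬ r = "M") (hT : ¬ r = "T")
    (hE10 : ¬ r = "E10+") (hE : ¬ r = "E") : PySem.Dict.getD levelDict r 0 = 0 := by
  simp [levelDict_mk, PySem.Dict.getD, PySem.Dict.get?,
    beq_iff_eq, Ne.symm hM, Ne.symm hT, Ne.symm hE10, Ne.symm hE]

-- A's loop body on a cumulative prefix moves to the prefix for the larger level
theorem stepA_table (r : String) (k : Nat) (hk : k ≤ 4) :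
    stepA (cumulative.getD k []) r =
      cumulative.getD (if PySem.Dict.getD levelDict r 0 > k then PySem.Dict.getD levelDict r 0 else k) [] := by
  by_cases hM : r = "M"
  · subst hM; interval_cases k <;> decide
  · by_cases hT : r = "T"
    · subst hT; interval_cases k <;> decide
    · by_cases hE10 : r = "E10+"
      · subst hE10; interval_cases k <;> decide
      · by_cases hE : r = "E"
        · subst hE; interval_cases k <;> decide
        · have hlvl : PySem.Dict.getD levelDict r 0 = 0 := by
            exact getD_levelDict_other r hM hT hE10 hE
          simp [stepA, hM, hT, hE10, hE, hlvl]

theorem loop_invariant (ratings : List String) (k : Nat) (hk : k ≤ 4) :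
    ratings.foldl stepA (cumulative.getD k []) =
      cumulative.getD (ratings.foldl (fun top esrb =>
        let level := PySem.Dict.getD levelDict esrb 0
        if level > top then level else top) k) [] := by
  induction ratings generalizing k with
  | nil => rfl
  | cons r rs ih =>
    simp only [List.foldl_cons]
    rw [stepA_table r k hk]
    apply ih
    by_cases h : PySem.Dict.getD levelDict r 0 > k
    · simp only [h, if_pos]
      by_cases hM : r = "M"
      · subst hM; decide
      · by_cases hT : r = "T"
        · subst hT; decide
        · by_cases hE10 : r = "E10+"
          · subst hE10; decide
          · by_cases hE : r = "E"
            · subst hE; decide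
            · simp [getD_levelDict_other r hM hT hE10 hE]
    · simpa [h] using hk

theorem ofList_table (t : Nat) :
    PySem.Set.ofList (cumulative.getD t []) = cumulative.getD t [] := by
  match t with
  | 0 => decide
  | 1 => decide
  | 2 => decide
  | 3 => decide
  | 4 => decide
  | (n + 5) => simp [cumulative, List.getD]

-- ===== VERDICT (by name: the statement is the Claim_ definition above) =====
theorem rec_esrb_spec : Claim_equal_rec_esrb := by
  intro ratings _
  unfold Spec_rec_esrb rec_esrb rec_esrb_alt
  have h0 : (PySem.Set.empty : PySem.Set String) = cumulative.getD 0 [] := rfl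
  rw [h0, loop_invariant ratings 0 (by decide), ofList_table]
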